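-- pv_equiv track=rewrite | github.com/mamba73/python_sync | sync.py | whitelist_matches
-- ===== SOURCE A (Python) =====
-- def whitelist_matches(rel_path, whitelist):
--     for entry in whitelist:
--         if entry.endswith("/"):
--             if rel_path.startswith(entry):
--                 return True
--         else:
--             if rel_path == entry:
--                 return True
--     return False
-- ===== SOURCE B (Python) =====
-- def whitelist_matches(rel_path, whitelist):
--     # Derive every string that could match from rel_path itself: rel_path (exact
--     # entry) and each prefix of rel_path cut just after a '/', then test the
--     # whitelist entries against that candidate set.
--     candidates = {rel_path}
--     for i, c in enumerate(rel_path):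
--         if c == '/':
--             candidates.add(rel_path[:i + 1])
--     return any(e in candidates for e in whitelist)
-- ===== Notes on version B (the rewrite author's own statement) =====
-- stated objective: alternative
-- what changed: B inverts the direction of the test: instead of scanning the whitelist and checking endswith/startswith per entry, it derives from rel_path the finite set of strings that could possibly match it (rel_path itself plus every prefix of rel_path cut just after a '/') and then checks each whitelist entry for membership in that set.
import Mathlib
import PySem

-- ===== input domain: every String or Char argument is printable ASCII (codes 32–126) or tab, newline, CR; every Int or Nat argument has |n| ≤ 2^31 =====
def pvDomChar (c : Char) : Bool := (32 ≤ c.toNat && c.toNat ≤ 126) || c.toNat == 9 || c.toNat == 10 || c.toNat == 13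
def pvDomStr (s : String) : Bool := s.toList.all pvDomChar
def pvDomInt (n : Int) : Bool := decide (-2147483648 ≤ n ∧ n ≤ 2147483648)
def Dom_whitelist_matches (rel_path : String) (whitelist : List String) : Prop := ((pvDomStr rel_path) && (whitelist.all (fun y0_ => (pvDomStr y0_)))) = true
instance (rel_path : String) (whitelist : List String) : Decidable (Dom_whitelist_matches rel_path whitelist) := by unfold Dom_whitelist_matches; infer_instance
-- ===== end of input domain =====

-- B inverts the direction of the test: it derives from rel_path the set of strings that could match it
-- (rel_path itself plus every prefix cut just after a '/') and checks the whitelist against that set (alternative, same cost on typical inputs).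

-- ===== PORT A =====
def whitelist_matches (rel_path : String) (whitelist : List String) : Bool :=
  match whitelist with
  | [] => false
  | entry :: rest =>
    if PySem.Str.endswith entry "/" then
      if PySem.Str.startswith rel_path entry then true
      else whitelist_matches rel_path rest
    else
      if rel_path == entry then true
      else whitelist_matches rel_path rest

-- ===== PORT B =====
def whitelist_matches_alt (rel_path : String) (whitelist : List String) : Bool :=
  let cands := (PySem.List.enumerate rel_path.toList 0).foldl
      (fun s p => if p.2 == '/' then PySem.Set.add s (PySem.Str.slice rel_path none (some (p.1 + 1))) else s)
      (PySem.Set.ofList [rel_path])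
  whitelist.any (fun e => PySem.Set.contains cands e)

-- ===== PRECONDITION & SPEC =====
def Spec_whitelist_matches (rel_path : String) (whitelist : List String) (out : Bool) : Prop := out = whitelist_matches_alt rel_path whitelist
instance (rel_path : String) (whitelist : List String) (out : Bool) : Decidable (Spec_whitelist_matches rel_path whitelist out) := by unfold Spec_whitelist_matches; infer_instance

-- ===== CLAIM (what is proved, stated in full; the proofs are below) =====
def Claim_equal_whitelist_matches : Prop := ∀ (rel_path : String) (whitelist : List String), Dom_whitelist_matches rel_path whitelist → Spec_whitelist_matches rel_path whitelist (whitelist_matches rel_path whitelist)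

-- ===== LEMMAS AND PROOFS =====

-- the per-entry predicate A evaluates
def wmPred (rel_path e : String) : Bool :=
  if PySem.Str.endswith e "/" then PySem.Str.startswith rel_path e else rel_path == e

theorem whitelist_matches_eq_any (rel_path : String) (whitelist : List String) :
    whitelist_matches rel_path whitelist = whitelist.any (wmPred rel_path) := by
  induction whitelist with
  | nil => rfl
  | cons e rest ih =>
    simp only [whitelist_matches, List.any_cons, wmPred]
    split_ifs with h1 h2 h3 <;> simp_all

-- membership in the fold that builds B's candidate set
theorem mem_fold_add (rel_path : String) (l : List (Int × Char)) (s : PySem.Set String) (x : String) :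
    x ∈ l.foldl (fun s p => if p.2 == '/' then PySem.Set.add s (PySem.Str.slice rel_path none (some (p.1 + 1))) else s) s ↔
      x ∈ s ∨ ∃ p ∈ l, p.2 = '/' ∧ x = PySem.Str.slice rel_path none (some (p.1 + 1)) := by
  induction l generalizing s with
  | nil => simp
  | cons a t ih =>
    simp only [List.foldl_cons]
    rw [ih]
    by_cases h : a.2 = '/'
    · simp only [h, beq_self_eq_true, if_true, PySem.Set.mem_add, List.mem_cons]
      constructor
      · rintro ((hs | hx) | hp)
        · exact Or.inl hs
        · exact Or.inr ⟨a, Or.inl rfl, h, hx⟩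
        · obtain ⟨p, hp1, hp2⟩ := hp; exact Or.inr ⟨p, Or.inr hp1, hp2⟩
      · rintro (hs | ⟨p, (rfl | hp1), hp2, hp3⟩)
        · exact Or.inl (Or.inl hs)
        · exact Or.inl (Or.inr hp3)
        · exact Or.inr ⟨p, hp1, hp2, hp3⟩
    · have h' : (a.2 == '/') = false := by simpa using h
      simp only [h']
      constructor
      · rintro (hs | hp)
        · exact Or.inl hs
        · obtain ⟨p, hp1, hp2⟩ := hp; exact Or.inr ⟨p, List.mem_cons_of_mem _ hp1, hp2⟩
      · rintro (hs | ⟨p, hp1, hp2, hp3⟩)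
        · exact Or.inl hs
        · rcases List.mem_cons.mp hp1 with rfl | hp1
          · exact absurd hp2 h
          · exact Or.inr ⟨p, hp1, hp2, hp3⟩

-- the candidate slice, on the list side
theorem slice_toList (rel_path : String) (k : Nat) :
    (PySem.Str.slice rel_path none (some ((k : Int) + 1))).toList = rel_path.toList.take (k + 1) := by
  have hcast : ((k : Int) + 1) = ((k + 1 : Nat) : Int) := by push_cast; ring
  rw [hcast, PySem.Str.toList_slice, PySem.Chars.slice_eq_listSlice, PySem.List.slice_to_natCast]

-- per-entry agreement: e is in B's candidate set iff A's per-entry predicate holds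
theorem contains_cands_eq_pred (rel_path e : String) :
    ((PySem.List.enumerate rel_path.toList 0).foldl
      (fun s p => if p.2 == '/' then PySem.Set.add s (PySem.Str.slice rel_path none (some (p.1 + 1))) else s)
      (PySem.Set.ofList [rel_path])).contains e = wmPred rel_path e := by
  rw [Bool.eq_iff_iff, PySem.Set.contains_iff, mem_fold_add]
  have hsl : ("/" : String).toList = ['/'] := by decide
  constructor
  · rintro (hmem | ⟨p, hp, hpslash, rfl⟩)
    · -- e = rel_path
      have he : e = rel_path := by simpa [PySem.Set.mem_ofList] using hmem
      subst he
      unfold wmPred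
      split_ifs with h
      · rw [PySem.Str.startswith_eq]
        exact (PySem.Chars.startswith_iff _ _).mpr (List.prefix_refl _)
      · simp
    · -- e = rel_path[:k+1] with rel_path[k] = '/'
      obtain ⟨k, hk, rfl⟩ := (PySem.List.mem_enumerate_iff _ _ _).mp hp
      simp only [zero_add] at hpslash ⊢
      have htl := slice_toList rel_path k
      have htake : rel_path.toList.take (k + 1) = rel_path.toList.take k ++ ['/'] := by
        rw [List.take_add_one]
        simp [List.getElem?_eq_getElem hk, hpslash]
      have hend : PySem.Str.endswith (PySem.Str.slice rel_path none (some ((k : Int) + 1))) "/" = true := by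
        rw [PySem.Str.endswith_eq]
        apply (PySem.Chars.endswith_iff _ _).mpr
        rw [hsl, htl, htake]
        exact ⟨_, rfl⟩
      unfold wmPred
      rw [if_pos hend, PySem.Str.startswith_eq]
      apply (PySem.Chars.startswith_iff _ _).mpr
      rw [htl]
      exact List.take_prefix _ _
  · intro hpred
    unfold wmPred at hpred
    split_ifs at hpred with h
    · -- entry ends with '/', rel_path starts with it: e is a slash-cut prefix candidate
      right
      rw [PySem.Str.startswith_eq] at hpred
      have hpre : e.toList <+: rel_path.toList := (PySem.Chars.startswith_iff _ _).mp hpred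
      rw [PySem.Str.endswith_eq] at h
      have hsuf : ['/'] <:+ e.toList := by rw [← hsl]; exact (PySem.Chars.endswith_iff _ _).mp h
      obtain ⟨t, ht⟩ := hsuf
      have hlen : e.toList.length = t.length + 1 := by rw [← ht]; simp
      have hlenle : e.toList.length ≤ rel_path.toList.length := hpre.length_le
      have hke : t.length < e.toList.length := by omega
      have hkl : t.length < rel_path.toList.length := by omega
      have h1 : e.toList[t.length]'hke = '/' := by
        simp [← ht]
      have hchar : rel_path.toList[t.length] = '/' :=
        (List.IsPrefix.getElem hpre hke).symm.trans h1
      refine ⟨((t.length : Int), '/'), ?_, rfl, ?_⟩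
      · apply (PySem.List.mem_enumerate_iff _ _ _).mpr
        refine ⟨t.length, hkl, ?_⟩
        rw [hchar]; simp
      · -- e equals the slice candidate
        apply String.toList_inj.mp
        rw [slice_toList]
        have hq := List.prefix_iff_eq_take.mp hpre
        rw [hlen] at hq
        exact hq
    · -- exact entry: e = rel_path
      left
      have : rel_path = e := by simpa using hpred
      simp [PySem.Set.mem_ofList, this]

-- ===== VERDICT (by name: the statement is the Claim_ definition above) =====
theorem whitelist_matches_spec : Claim_equal_whitelist_matches := by
  intro rel_path whitelist _
  unfold Spec_whitelist_matches whitelist_matches_alt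
  rw [whitelist_matches_eq_any]
  exact List.any_congr rfl (fun e => (contains_cands_eq_pred rel_path e).symm)
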